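-- pv_equiv track=rewrite | github.com/TejaSree023/Operator-precedence | analyzer.py | _strip_outer_parentheses
-- ===== SOURCE A (Python) =====
-- from typing import Dict, List, Optional, Set, Tuple
--
-- def _strip_outer_parentheses(tokens: List[str]) -> List[str]:
--     while len(tokens) >= 2 and tokens[0] == "(" and tokens[-1] == ")":
--         depth = 0
--         wraps_all = True
--         for idx, token in enumerate(tokens):
--             if token == "(":
--                 depth += 1
--             elif token == ")":
--                 depth -= 1
--                 if depth == 0 and idx < len(tokens) - 1:
--                     wraps_all = False
--                     break
--         if wraps_all:
--             tokens = tokens[1:-1]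
--         else:
--             break
--     return tokens
-- ===== SOURCE B (Python) =====
-- from typing import List
--
-- def _strip_outer_parentheses(tokens: List[str]) -> List[str]:
--     n = len(tokens)
--     lead = 0
--     for tok in tokens:
--         if tok != "(":
--             break
--         lead += 1
--     trail = 0
--     for tok in reversed(tokens):
--         if tok != ")":
--             break
--         trail += 1
--     k = min(lead, trail)
--     depth = 0
--     for i, tok in enumerate(tokens[:-1]):
--         if tok == "(":
--             depth += 1
--         elif tok == ")":
--             depth -= 1
--         if depth < min(i + 1, n - 1 - i):
--             k = min(k, depth)
--     if k < 0:
--         k = 0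
--     return tokens[k:n - k]
-- ===== Notes on version B (the rewrite author's own statement) =====
-- stated objective: alternative
-- what changed: Replaces the strip-one-layer-and-rescan while loop (one full wrap-check scan per stripped layer) by a single-pass formulation: one depth-profile pass plus the leading-'('/trailing-')' run lengths determine the number k of strippable layers, and one slice tokens[k:n-k] produces the result.
import Mathlib
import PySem

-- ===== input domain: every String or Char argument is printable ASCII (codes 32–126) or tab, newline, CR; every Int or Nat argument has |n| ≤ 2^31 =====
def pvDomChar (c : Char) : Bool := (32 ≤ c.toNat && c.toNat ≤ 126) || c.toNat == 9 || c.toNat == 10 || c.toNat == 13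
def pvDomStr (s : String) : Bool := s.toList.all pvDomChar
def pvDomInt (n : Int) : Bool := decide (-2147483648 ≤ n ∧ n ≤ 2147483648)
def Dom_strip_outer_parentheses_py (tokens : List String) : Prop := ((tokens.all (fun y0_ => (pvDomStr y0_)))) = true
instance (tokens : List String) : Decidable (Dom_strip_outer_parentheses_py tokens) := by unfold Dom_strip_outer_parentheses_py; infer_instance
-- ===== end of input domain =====

-- B replaces A's strip-one-layer-then-rescan while loop by a single depth-profile pass and one slice (a different algorithm of similar cost).


-- ===== PORT A =====
-- tokens[1:-1] as clamped drop/take; cited by the port's decreasing_by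
theorem pv_slice_core (xs : List String) :
    PySem.List.slice xs (some 1) (some (-1)) = (xs.drop 1).dropLast := by
  simp only [PySem.List.slice, PySem.List.clampIdx, Int.reduceNeg, Int.neg_neg_iff_pos,
    zero_lt_one, reduceIte, add_neg_lt_iff_lt_add, zero_add, Nat.cast_lt_one,
    List.length_eq_zero_iff, Int.reduceLT, Int.toNat_one, List.drop_one]
  cases xs with
  | nil => simp
  | cons t r => simp [List.dropLast_eq_take]

-- the inner 'for idx, token in enumerate(tokens)' loop with its break; returns wraps_all
def pvScanA : List String → Int → Int → Int → Bool
  | [], _, _, _ => true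
  | t :: rest, n, idx, depth =>
    if t = "(" then pvScanA rest n (idx + 1) (depth + 1)
    else if t = ")" then
      if depth - 1 = 0 ∧ idx < n - 1 then false
      else pvScanA rest n (idx + 1) (depth - 1)
    else pvScanA rest n (idx + 1) depth

def strip_outer_parentheses_py (tokens : List String) : List String :=
  if h : 2 ≤ tokens.length ∧ tokens.head? = some "(" ∧ tokens.getLast? = some ")" then
    if pvScanA tokens (tokens.length : Int) 0 0 then
      strip_outer_parentheses_py (PySem.List.slice tokens (some 1) (some (-1)))
    else tokens
  else tokens
termination_by tokens.length
decreasing_by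
  rw [pv_slice_core]
  simp only [List.length_dropLast, List.length_drop]
  omega

-- ===== PORT B =====
-- length of the leading run of token c ('for tok in …: if tok != c: break')
def pvRun (c : String) : List String → Int
  | [] => 0
  | t :: r => if t = c then 1 + pvRun c r else 0

-- 'for i, tok in enumerate(tokens[:-1]):' updating depth and k
def pvLoopB : List String → Int → Int → Int → Int → Int
  | [], _, _, _, k => k
  | t :: r, n, i, depth, k =>
    let d := if t = "(" then depth + 1 else if t = ")" then depth - 1 else depth
    let k' := if d < min (i + 1) (n - 1 - i) then min k d else k
    pvLoopB r n (i + 1) d k'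

def strip_outer_parentheses_py_alt (tokens : List String) : List String :=
  let n : Int := tokens.length
  let k0 := min (pvRun "(" tokens) (pvRun ")" tokens.reverse)
  let k1 := pvLoopB tokens.dropLast n 0 0 k0
  let k := if k1 < 0 then 0 else k1
  PySem.List.slice tokens (some k) (some (n - k))

-- ===== PRECONDITION & SPEC =====
def Spec_strip_outer_parentheses_py (tokens : List String) (out : List String) : Prop := out = strip_outer_parentheses_py_alt tokens
instance (tokens : List String) (out : List String) : Decidable (Spec_strip_outer_parentheses_py tokens out) := by unfold Spec_strip_outer_parentheses_py; infer_instance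

-- ===== CLAIM (what is proved, stated in full; the proofs are below) =====
def Claim_equal_strip_outer_parentheses_py : Prop := ∀ (tokens : List String), Dom_strip_outer_parentheses_py tokens → Spec_strip_outer_parentheses_py tokens (strip_outer_parentheses_py tokens)

-- ===== LEMMAS AND PROOFS =====

-- running depth of the token stream, started at d
def pvStep (d : Int) (t : String) : Int := if t = "(" then d + 1 else if t = ")" then d - 1 else d

def pvDep (d : Int) : List String → Int
  | [] => d
  | t :: r => pvDep (pvStep d t) r

theorem pvDep_append (d : Int) (xs ys : List String) :
    pvDep d (xs ++ ys) = pvDep (pvDep d xs) ys := by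
  induction xs generalizing d with
  | nil => rfl
  | cons t r ih => simp [pvDep, ih]

theorem pvStep_add (d c : Int) (t : String) : pvStep (d + c) t = pvStep d t + c := by
  unfold pvStep; split_ifs <;> ring

theorem pvDep_add (d c : Int) (xs : List String) : pvDep (d + c) xs = pvDep d xs + c := by
  induction xs generalizing d with
  | nil => rfl
  | cons t r ih => simp [pvDep, pvStep_add, ih]

theorem pvLoopB_step_eq (t : String) (r : List String) (n i depth k : Int) :
    pvLoopB (t :: r) n i depth k =
      pvLoopB r n (i + 1) (pvStep depth t)
        (if pvStep depth t < min (i + 1) (n - 1 - i) then min k (pvStep depth t) else k) := by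
  rfl

theorem pvLoopB_append (xs ys : List String) (n i d k : Int) :
    pvLoopB (xs ++ ys) n i d k =
      pvLoopB ys n (i + xs.length) (pvDep d xs) (pvLoopB xs n i d k) := by
  induction xs generalizing i d k with
  | nil => simp [pvLoopB, pvDep]
  | cons t r ih =>
    rw [List.cons_append, pvLoopB_step_eq, ih, pvLoopB_step_eq]
    simp [pvDep]
    ring_nf

theorem pvLoopB_le (xs : List String) (n i d k : Int) : pvLoopB xs n i d k ≤ k := by
  induction xs generalizing i d k with
  | nil => simp [pvLoopB]
  | cons t r ih =>
    rw [pvLoopB_step_eq]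
    refine le_trans (ih _ _ _) ?_
    split_ifs with h
    · exact min_le_left _ _
    · exact le_refl _

theorem pvLoopB_shift (xs : List String) (n i d k : Int) :
    pvLoopB xs n (i + 1) (d + 1) (k + 1) = pvLoopB xs (n - 2) i d k + 1 := by
  induction xs generalizing i d k with
  | nil => simp [pvLoopB]
  | cons t r ih =>
    rw [pvLoopB_step_eq, pvLoopB_step_eq, pvStep_add]
    have hcond : (pvStep d t + 1 < min (i + 1 + 1) (n - 1 - (i + 1))) ↔
        (pvStep d t < min (i + 1) (n - 2 - 1 - i)) := by omega
    by_cases h : pvStep d t < min (i + 1) (n - 2 - 1 - i)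
    · rw [if_pos (hcond.mpr h), if_pos h]
      have : min (k + 1) (pvStep d t + 1) = min k (pvStep d t) + 1 := by omega
      rw [this, ih]
    · rw [if_neg (fun hc => h (hcond.mp hc)), if_neg h, ih]

theorem pvLoopB_nonneg (xs : List String) (n i d k : Int)
    (hd : ∀ j : Nat, 0 ≤ pvDep d (xs.take (j + 1))) (hk : 0 ≤ k) :
    0 ≤ pvLoopB xs n i d k := by
  induction xs generalizing i d k with
  | nil => simpa [pvLoopB] using hk
  | cons t r ih =>
    rw [pvLoopB_step_eq]
    have h0 : 0 ≤ pvStep d t := by simpa [List.take, pvDep] using hd 0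
    refine ih _ _ _ (fun j => ?_) ?_
    · simpa [List.take, pvDep] using hd (j + 1)
    · split_ifs with h
      · exact le_min hk h0
      · exact hk

theorem pvLoopB_le_zero (xs : List String) (n i d k : Int) (j : Nat)
    (hj : j < xs.length) (hdep : pvDep d (xs.take (j + 1)) = 0)
    (hi : 0 ≤ i) (hbound : i + j ≤ n - 2) :
    pvLoopB xs n i d k ≤ 0 := by
  induction xs generalizing i d k j with
  | nil => simp at hj
  | cons t r ih =>
    rw [pvLoopB_step_eq]
    cases j with
    | zero =>
      have hstep : pvStep d t = 0 := by simpa [List.take, pvDep] using hdep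
      have hc : pvStep d t < min (i + 1) (n - 1 - i) := by omega
      rw [if_pos hc]
      refine le_trans (pvLoopB_le _ _ _ _ _) ?_
      omega
    | succ j' =>
      refine ih _ _ _ j' (by simpa using hj) ?_ (by omega) (by push_cast at hbound ⊢; omega)
      simpa [List.take, pvDep] using hdep

theorem pvScanA_false (xs : List String) (n idx d : Int)
    (h : pvScanA xs n idx d = false) :
    ∃ j : Nat, j < xs.length ∧ idx + j < n - 1 ∧ pvDep d (xs.take (j + 1)) = 0 := by
  induction xs generalizing idx d with
  | nil => simp [pvScanA] at h
  | cons t r ih =>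
    by_cases hl : t = "("
    · obtain ⟨j, hj, hr, hdep⟩ := ih (idx + 1) (d + 1) (by simpa [pvScanA, hl] using h)
      exact ⟨j + 1, by simpa using Nat.succ_lt_succ hj, by push_cast; omega,
        by simpa [List.take, pvDep, pvStep, hl] using hdep⟩
    · by_cases hr' : t = ")"
      · by_cases hbrk : d - 1 = 0 ∧ idx < n - 1
        · exact ⟨0, by simp, by push_cast; omega, by simp [List.take, pvDep, pvStep, hr', hbrk.1]⟩
        · obtain ⟨j, hj, hrj, hdep⟩ := ih (idx + 1) (d - 1)
            (by simpa [pvScanA, hl, hr', hbrk] using h)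
          exact ⟨j + 1, by simpa using Nat.succ_lt_succ hj, by push_cast; omega,
            by simpa [List.take, pvDep, pvStep, hl, hr'] using hdep⟩
      · obtain ⟨j, hj, hrj, hdep⟩ := ih (idx + 1) d (by simpa [pvScanA, hl, hr'] using h)
        exact ⟨j + 1, by simpa using Nat.succ_lt_succ hj, by push_cast; omega,
          by simpa [List.take, pvDep, pvStep, hl, hr'] using hdep⟩

theorem pvScanA_true_pos (xs : List String) (n idx d : Int)
    (h : pvScanA xs n idx d = true) (hd : 1 ≤ d) :
    ∀ j : Nat, j < xs.length → idx + j < n - 1 → 1 ≤ pvDep d (xs.take (j + 1)) := by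
  induction xs generalizing idx d with
  | nil => intro j hj; simp at hj
  | cons t r ih =>
    intro j hj hr
    by_cases hl : t = "("
    · cases j with
      | zero => simp [List.take, pvDep, pvStep, hl]; omega
      | succ j' =>
        have := ih (idx + 1) (d + 1) (by simpa [pvScanA, hl] using h) (by omega) j'
          (by simpa using hj) (by omega)
        simpa [List.take, pvDep, pvStep, hl] using this
    · by_cases hr' : t = ")"
      · have hidx : idx < n - 1 := by omega
        have hbrk : ¬(d - 1 = 0 ∧ idx < n - 1) := by
          intro hc
          simp [pvScanA, hr', if_pos hc] at h
        have hd1 : 1 ≤ d - 1 := by omega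
        cases j with
        | zero => simp [List.take, pvDep, pvStep, hr']; omega
        | succ j' =>
          have hrec : pvScanA r n (idx + 1) (d - 1) = true := by
            simpa [pvScanA, hl, hr', hbrk] using h
          have := ih (idx + 1) (d - 1) hrec hd1 j' (by simpa using hj)
            (by omega)
          simpa [List.take, pvDep, pvStep, hl, hr'] using this
      · cases j with
        | zero => simp [List.take, pvDep, pvStep, hl, hr']; omega
        | succ j' =>
          have := ih (idx + 1) d (by simpa [pvScanA, hl, hr'] using h) hd j'
            (by simpa using hj) (by omega)
          simpa [List.take, pvDep, pvStep, hl, hr'] using this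

theorem pvRun_nonneg (c : String) (xs : List String) : 0 ≤ pvRun c xs := by
  induction xs with
  | nil => simp [pvRun]
  | cons t r ih => unfold pvRun; split_ifs <;> omega

theorem pvRun_le_length (c : String) (xs : List String) : pvRun c xs ≤ xs.length := by
  induction xs with
  | nil => simp [pvRun]
  | cons t r ih => unfold pvRun; split_ifs <;> simp <;> omega

theorem pvRun_append_ne (c y : String) (xs : List String) (hy : y ≠ c) :
    pvRun c (xs ++ [y]) = pvRun c xs := by
  induction xs with
  | nil => simp [pvRun, hy]
  | cons t r ih =>
    simp only [List.cons_append, pvRun]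
    split_ifs with h
    · rw [ih]
    · rfl

theorem pvRun_eq_zero (c : String) (xs : List String) (h : xs.head? ≠ some c) : pvRun c xs = 0 := by
  cases xs with
  | nil => rfl
  | cons t r =>
    have ht : t ≠ c := by simpa using h
    simp [pvRun, ht]

theorem pv_slice_all (xs : List String) :
    PySem.List.slice xs (some 0) (some (xs.length : Int)) = xs := by
  simp [PySem.List.slice_zero_start, PySem.List.slice_to_natCast]

-- B's accumulators, named so the proofs can talk about them (pvB_eq is definitional)
def pvK0 (tokens : List String) : Int := min (pvRun "(" tokens) (pvRun ")" tokens.reverse)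
def pvK1 (tokens : List String) : Int := pvLoopB tokens.dropLast (tokens.length : Int) 0 0 (pvK0 tokens)
def pvK (tokens : List String) : Int := if pvK1 tokens < 0 then 0 else pvK1 tokens

theorem pvB_eq (tokens : List String) :
    strip_outer_parentheses_py_alt tokens =
      PySem.List.slice tokens (some (pvK tokens)) (some ((tokens.length : Int) - pvK tokens)) := rfl

theorem pvB_of_nonpos (tokens : List String) (h : pvK1 tokens ≤ 0) :
    strip_outer_parentheses_py_alt tokens = tokens := by
  rw [pvB_eq]
  have hk : pvK tokens = 0 := by unfold pvK; split_ifs <;> omega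
  rw [hk]
  have h := pv_slice_all tokens
  simp only [Int.sub_zero] at *
  exact h

theorem pv_slice_shift (core : List String) (m : Nat) (hm : m ≤ core.length) :
    PySem.List.slice ("(" :: core ++ [")"]) (some ((m : Int) + 1))
        (some (((core.length : Int) + 2) - ((m : Int) + 1))) =
      PySem.List.slice core (some (m : Int)) (some ((core.length : Int) - (m : Int))) := by
  rw [PySem.List.slice_toNat _ (by omega) (by omega),
      PySem.List.slice_toNat _ (by omega) (by omega)]
  have h1 : ((m : Int) + 1).toNat = m + 1 := by omega
  have h2 : (((core.length : Int) + 2) - ((m : Int) + 1)).toNat = core.length + 1 - m := by omega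
  have h3 : ((m : Int)).toNat = m := by omega
  have h4 : ((core.length : Int) - (m : Int)).toNat = core.length - m := by omega
  rw [h1, h2, h3, h4]
  have hdrop : ("(" :: core ++ [")"]).drop (m + 1) = core.drop m ++ [")"] := by
    simpa using List.drop_append_of_le_length (l₂ := [")"]) hm
  rw [hdrop]
  have ht : core.length + 1 - m - (m + 1) ≤ (core.drop m).length := by
    simp [List.length_drop]; omega
  rw [List.take_append_of_le_length ht]
  congr 1
  omega

-- main equivalence, by induction on a length bound
theorem pv_main : ∀ (N : Nat) (tokens : List String), tokens.length ≤ N →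
    strip_outer_parentheses_py tokens = strip_outer_parentheses_py_alt tokens := by
  intro N
  induction N with
  | zero =>
    intro tokens h
    have : tokens = [] := by cases tokens <;> simp_all
    subst this
    rw [strip_outer_parentheses_py, dif_neg (by simp)]
    exact (pvB_of_nonpos [] (by decide)).symm
  | succ N ih =>
    intro tokens hlen
    by_cases hcond : 2 ≤ tokens.length ∧ tokens.head? = some "(" ∧ tokens.getLast? = some ")"
    · -- the while-loop condition holds
      obtain ⟨hlen2, hhd, hlast⟩ := hcond
      obtain ⟨rest, rfl⟩ : ∃ rest, tokens = "(" :: rest := by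
        cases tokens with
        | nil => simp at hhd
        | cons t r =>
          have ht : t = "(" := by simpa using hhd
          exact ⟨r, by rw [ht]⟩
      have hrne : rest ≠ [] := by intro h; subst h; simp at hlen2
      obtain ⟨core, rfl⟩ : ∃ core, rest = core ++ [")"] := by
        refine ⟨rest.dropLast, ?_⟩
        have hg : rest.getLast hrne = ")" := by
          have h2 : ("(" :: rest).getLast? = some (rest.getLast hrne) := by
            have hc : ("(" :: rest).getLast? = rest.getLast? := by
              cases rest with
              | nil => exact absurd rfl hrne
              | cons a b => simp [List.getLast?_cons_cons]
            rw [hc]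
            exact List.getLast?_eq_some_getLast hrne
          rw [h2] at hlast
          simpa using hlast
        have h3 := (List.dropLast_append_getLast hrne).symm
        rw [hg] at h3
        exact h3
      -- notation
      obtain ⟨M, hM⟩ : ∃ M : Nat, core.length = M := ⟨_, rfl⟩
      have hlenTok : ("(" :: (core ++ [")"])).length = M + 2 := by simp [hM]
      have hcond' : 2 ≤ ("(" :: (core ++ [")"])).length ∧ ("(" :: (core ++ [")"])).head? = some "(" ∧
          ("(" :: (core ++ [")"])).getLast? = some ")" := ⟨hlen2, hhd, hlast⟩
      have hdropLast : ("(" :: (core ++ [")"])).dropLast = "(" :: core := by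
        rw [show ("(" :: (core ++ [")"])) = ("(" :: core) ++ [")"] by simp, List.dropLast_concat]
      have hrev : ("(" :: (core ++ [")"])).reverse = ")" :: (core.reverse ++ ["("]) := by
        simp
      have hK0 : pvK0 ("(" :: (core ++ [")"])) = 1 + pvK0 core := by
        unfold pvK0
        rw [hrev]
        have h1 : pvRun "(" ("(" :: (core ++ [")"])) = 1 + pvRun "(" core := by
          simp only [pvRun, if_true]
          rw [pvRun_append_ne _ _ _ (by decide)]
        have h2 : pvRun ")" (")" :: (core.reverse ++ ["("])) = 1 + pvRun ")" core.reverse := by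
          simp only [pvRun, if_true]
          rw [pvRun_append_ne _ _ _ (by decide)]
        rw [h1, h2]
        omega
      have hscan0 : pvScanA ("(" :: (core ++ [")"])) ((M : Int) + 2) 0 0 =
          pvScanA (core ++ [")"]) ((M : Int) + 2) 1 1 := by
        simp [pvScanA]
      by_cases hscan : pvScanA ("(" :: (core ++ [")"])) ((("(" :: (core ++ [")"])).length : Int)) 0 0 = true
      · -- wraps_all: A strips one layer and recurses
        rw [strip_outer_parentheses_py, dif_pos hcond', if_pos hscan, pv_slice_core]
        have hcore' : (("(" :: (core ++ [")"])).drop 1).dropLast = core := by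
          simp
        rw [hcore']
        rw [ih core (by simp at hlen; omega)]
        -- now show B core = B tokens
        have hscan1 : pvScanA (core ++ [")"]) ((M : Int) + 2) 1 1 = true := by
          rw [← hscan0]
          simpa [hlenTok] using hscan
        have HposC : ∀ j : Nat, j < M → 1 ≤ pvDep 1 (core.take (j + 1)) := by
          intro j hj
          have := pvScanA_true_pos (core ++ [")"]) ((M : Int) + 2) 1 1 hscan1 (by omega) j
            (by simp; omega) (by omega)
          rwa [List.take_append_of_le_length (by omega)] at this
        have HdepC : 1 ≤ pvDep 1 core := by
          cases hc : core with
          | nil => simp [pvDep]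
          | cons a b =>
            have hMc : (a :: b).length = M := by rw [← hc]; exact hM
            have h := HposC ((a :: b).length - 1) (by simp at hMc ⊢; omega)
            rw [hc] at h
            rwa [Nat.sub_add_cancel (by simp), List.take_length] at h
        rcases List.eq_nil_or_concat core with hcnil | ⟨cs, c, hcs⟩
        · subst hcnil
          decide
        · -- core = cs ++ [c]
          rw [List.concat_eq_append] at hcs
          have hclen : core.length = cs.length + 1 := by rw [hcs]; simp
          have hcs_len : cs.length = M - 1 := by omega
          have hMpos : 1 ≤ M := by omega
          -- k1 of tokens
          have hk1 : pvK1 ("(" :: (core ++ [")"])) = pvLoopB core ((M : Int) + 2) 1 1 (1 + pvK0 core) := by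
            unfold pvK1
            rw [hdropLast, hK0, hlenTok, pvLoopB_step_eq]
            have hs : pvStep 0 "(" = 1 := by decide
            rw [hs]
            rw [if_neg (by omega)]
            norm_num
          have hlast_step : ∀ k : Int, pvLoopB core ((M : Int) + 2) 1 1 k =
              pvLoopB cs ((M : Int) + 2) 1 1 k := by
            intro k
            rw [hcs, pvLoopB_append, pvLoopB_step_eq]
            have hd'' : pvStep (pvDep 1 cs) c = pvDep 1 core := by
              rw [hcs, pvDep_append]; rfl
            rw [hd'']
            rw [if_neg (by rw [hcs_len]; omega)]
            rfl
          have hshift : pvLoopB cs ((M : Int) + 2) 1 1 (pvK0 core + 1) =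
              pvLoopB cs (M : Int) 0 0 (pvK0 core) + 1 := by
            have := pvLoopB_shift cs ((M : Int) + 2) 0 0 (pvK0 core)
            simpa using this
          have hdl : core.dropLast = cs := by
            rw [hcs]; exact List.dropLast_concat ..
          have hk1core : pvK1 core = pvLoopB cs (M : Int) 0 0 (pvK0 core) := by
            unfold pvK1
            rw [hdl, hM]
          have hk1tok : pvK1 ("(" :: (core ++ [")"])) = pvK1 core + 1 := by
            rw [hk1, hlast_step, hk1core]
            rw [show (1 + pvK0 core) = pvK0 core + 1 from by ring, hshift]
          -- k1 of core is nonnegative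
          have hk0c_nonneg : 0 ≤ pvK0 core := le_min (pvRun_nonneg _ _) (pvRun_nonneg _ _)
          have hk1c_nonneg : 0 ≤ pvK1 core := by
            rw [hk1core]
            refine pvLoopB_nonneg cs (M : Int) 0 0 (pvK0 core) (fun j => ?_) hk0c_nonneg
            have hadd := pvDep_add 0 1 (cs.take (j + 1))
            norm_num at hadd
            by_cases hj : j < cs.length
            · have heq : cs.take (j + 1) = core.take (j + 1) := by
                rw [hcs, List.take_append_of_le_length (by omega)]
              have hp := HposC j (by omega)
              rw [← heq] at hp
              omega
            · have heq : cs.take (j + 1) = cs := List.take_of_length_le (by omega)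
              rw [heq] at hadd ⊢
              rcases Nat.eq_zero_or_pos cs.length with h0 | hpos
              · have h0' : cs = [] := List.eq_nil_of_length_eq_zero h0
                subst h0'
                simp [pvDep]
              · have heq2 : core.take (cs.length - 1 + 1) = cs := by
                  rw [Nat.sub_add_cancel hpos, hcs, List.take_append_of_le_length (le_refl _),
                    List.take_length]
                have hp := HposC (cs.length - 1) (by omega)
                rw [heq2] at hp
                omega
          -- collapse both B's
          have hKtok : pvK ("(" :: (core ++ [")"])) = pvK core + 1 := by
            unfold pvK
            rw [hk1tok, if_neg (by omega), if_neg (by omega)]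
          have hKcore_le : pvK core ≤ (M : Int) := by
            unfold pvK
            have h1 : pvK1 core ≤ pvK0 core := by rw [hk1core]; exact pvLoopB_le _ _ _ _ _
            have h2 : pvK0 core ≤ (M : Int) := le_trans (min_le_left _ _)
              (by simpa [hM] using pvRun_le_length "(" core)
            split_ifs <;> omega
          have hKnn : 0 ≤ pvK core := by unfold pvK; split_ifs <;> omega
          obtain ⟨m, hm⟩ : ∃ m : Nat, pvK core = (m : Int) := ⟨(pvK core).toNat, by omega⟩
          have hlen' : ((("(" :: (core ++ [")"])).length : Nat) : Int) = (core.length : Int) + 2 := by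
            rw [hlenTok]
            push_cast
            omega
          rw [pvB_eq ("(" :: (core ++ [")"])), pvB_eq core, hKtok, hm, hlen']
          exact (pv_slice_shift core m (by omega)).symm
      · -- not wraps_all: A stops and returns tokens
        rw [strip_outer_parentheses_py, dif_pos hcond', if_neg hscan]
        have hscanF : pvScanA (core ++ [")"]) ((M : Int) + 2) 1 1 = false := by
          rw [← hscan0]
          simpa [hlenTok] using (Bool.not_eq_true _).mp hscan
        obtain ⟨j, hj, hjr, hdep⟩ := pvScanA_false (core ++ [")"]) ((M : Int) + 2) 1 1 hscanF
        have hjM : j < M := by omega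
        have hdep' : pvDep 1 (core.take (j + 1)) = 0 := by
          rwa [List.take_append_of_le_length (by omega)] at hdep
        have hk1le : pvK1 ("(" :: (core ++ [")"])) ≤ 0 := by
          unfold pvK1
          rw [hdropLast, hlenTok]
          refine pvLoopB_le_zero ("(" :: core) _ 0 0 _ (j + 1) (by simp; omega) ?_ (by omega)
            (by push_cast; omega)
          have hstep : pvStep 0 "(" = 1 := by decide
          simpa [List.take_succ_cons, pvDep, hstep] using hdep'
        exact (pvB_of_nonpos _ hk1le).symm
    · -- the while-loop condition fails: both return tokens
      rw [strip_outer_parentheses_py, dif_neg hcond]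
      have hmin : pvK0 tokens = 0 := by
        unfold pvK0
        by_cases hh : tokens.head? = some "("
        · have hl' : tokens.getLast? ≠ some ")" := by
            by_cases h2 : 2 ≤ tokens.length
            · intro hl
              exact hcond ⟨h2, hh, hl⟩
            · match tokens, hh with
              | t :: r, hh =>
                have ht : t = "(" := by simpa using hh
                have hr : r = [] := by
                  cases r with
                  | nil => rfl
                  | cons a b => simp at h2
                subst ht; subst hr
                decide
          rw [pvRun_eq_zero ")" tokens.reverse (by rw [List.head?_reverse]; exact hl')]
          have := pvRun_nonneg "(" tokens
          omega
        · rw [pvRun_eq_zero "(" tokens hh]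
          have := pvRun_nonneg ")" tokens.reverse
          omega
      have hk1le : pvK1 tokens ≤ 0 := by
        unfold pvK1
        rw [hmin]
        exact pvLoopB_le _ _ _ _ _
      exact (pvB_of_nonpos _ hk1le).symm

-- ===== VERDICT (by name: the statement is the Claim_ definition above) =====
theorem strip_outer_parentheses_py_spec : Claim_equal_strip_outer_parentheses_py := by
  intro tokens _
  exact pv_main tokens.length tokens (le_refl _)
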